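-- pv_equiv track=rewrite | github.com/OPeaga/python-graphs | DFS/atv1_pontoExtra.py | DFS
-- ===== SOURCE A (Python) =====
-- def DFS(m, vactual, final_v, visited: list):
--     visited.append(vactual)
--
--     if vactual == final_v:
--         return True
--
--     # Explorar os vizinhos
--     for neighbor in getNeighbors(m,vactual):
--         if neighbor not in visited:
--             if DFS(m,neighbor, final_v, visited):
--                 return True
--             pass
--         pass
--     visited.pop(visited.index(vactual))
--     return False
--
-- def getNeighbors(m: list,vactual):
--     neighbors = []
--     for vertices in range(len(m)):
--         if vertices == vactual:
--             iterator = 0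
--             for edges in m[vertices]:
--                 if edges == 1:
--                     neighbors.append(iterator)
--                 iterator+=1
--     return neighbors
-- ===== SOURCE B (Python) =====
-- # Iterative worklist reachability with a permanent 'seen' set instead of A's
-- # recursive all-simple-paths backtracking DFS: same boolean result, with each
-- # vertex expanded at most once.  NOTE: equivalence is about the RETURN value;
-- # B mutates 'visited' only by the single initial append (A also pops on failure
-- # and leaves the whole path on success).
-- def DFS(m, vactual, final_v, visited: list):
--     visited.append(vactual)
--     if vactual == final_v:
--         return True
--     seen = set(visited)
--     stack = [vactual]
--     while stack:
--         v = stack.pop()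
--         for w in getNeighborsB(m, v):
--             if w not in seen:
--                 if w == final_v:
--                     return True
--                 seen.add(w)
--                 stack.append(w)
--     return False
--
-- def getNeighborsB(m, v):
--     if 0 <= v < len(m):
--         return [j for j, e in enumerate(m[v]) if e == 1]
--     return []
-- ===== Notes on version B (the rewrite author's own statement) =====
-- stated objective: alternative
-- what changed: Replaced A's recursive backtracking DFS (which un-marks vertices on failure and can re-explore a vertex along different paths) by an iterative worklist reachability search with a permanent seen set and an explicit stack, expanding each vertex at most once; the return value is identical, only the in-place mutation of 'visited' differs (B performs just the initial append).
import Mathlib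
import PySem

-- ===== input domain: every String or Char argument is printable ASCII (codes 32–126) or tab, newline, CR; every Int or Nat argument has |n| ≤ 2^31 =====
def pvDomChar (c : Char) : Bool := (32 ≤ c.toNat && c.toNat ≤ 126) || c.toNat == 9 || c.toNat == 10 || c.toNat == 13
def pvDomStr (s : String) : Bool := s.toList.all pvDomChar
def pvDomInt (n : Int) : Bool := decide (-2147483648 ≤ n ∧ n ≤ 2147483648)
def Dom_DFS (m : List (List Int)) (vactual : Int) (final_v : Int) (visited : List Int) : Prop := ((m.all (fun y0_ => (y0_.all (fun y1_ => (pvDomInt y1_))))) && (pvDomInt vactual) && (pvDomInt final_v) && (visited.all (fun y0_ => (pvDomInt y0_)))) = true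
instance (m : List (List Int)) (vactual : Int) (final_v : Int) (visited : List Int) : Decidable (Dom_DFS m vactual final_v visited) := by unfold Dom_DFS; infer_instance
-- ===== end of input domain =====

-- One honest line: B replaces A's backtracking (un-marking) recursive DFS by an iterative
-- worklist search with a permanent seen set; the proved equivalence is about the RETURN
-- value only (A and B mutate the Python argument `visited` differently).

-- fuel bound used by both ports purely as a totality guard (max row length + 2 bounds
-- the recursion depth of A and the iteration count of B; proved sufficient below)
def pvMaxRow (m : List (List Int)) : Nat := m.foldl (fun a r => max a r.length) 0

-- ===== PORT A =====
def getNeighborsA (m : List (List Int)) (vactual : Int) : List Int :=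
  (List.range m.length).foldl (fun neighbors (vertices : Nat) =>
    if (vertices : Int) = vactual then
      ((m.getD vertices []).foldl
        (fun (p : List Int × Int) edges =>
          (if edges = 1 then p.1 ++ [p.2] else p.1, p.2 + 1))
        (neighbors, 0)).1
    else neighbors) []

mutual
  -- dfsA f v vis: A's recursive DFS; returns (result, visited-after)
  def dfsA (m : List (List Int)) (fv : Int) : Nat → Int → List Int → Bool × List Int
    | 0, _, vis => (false, vis)
    | f+1, v, vis =>
      let vis1 := vis ++ [v]
      if v = fv then (true, vis1)
      else
        let r := dfsAList m fv f (getNeighborsA m v) vis1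
        if r.1 then r else (false, r.2.erase v)   -- visited.pop(visited.index(v))
  termination_by f v vis => (f, 0)
  -- the `for neighbor in getNeighbors(...)` loop with its early `return True`
  def dfsAList (m : List (List Int)) (fv : Int) : Nat → List Int → List Int → Bool × List Int
    | _, [], vis => (false, vis)
    | f, n :: ns, vis =>
      if n ∈ vis then dfsAList m fv f ns vis
      else
        let r := dfsA m fv f n vis
        if r.1 then r else dfsAList m fv f ns r.2
  termination_by f ns vis => (f, ns.length + 1)
end

def DFS (m : List (List Int)) (vactual : Int) (final_v : Int) (visited : List Int) : Bool :=
  (dfsA m final_v (pvMaxRow m + 2) vactual visited).1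

-- ===== PORT B =====
def getNeighborsB (m : List (List Int)) (v : Int) : List Int :=
  if 0 ≤ v ∧ v < (m.length : Int) then
    ((PySem.List.enumerate (m.getD v.toNat []) 0).filter (fun p => p.2 = 1)).map (fun p => p.1)
  else []

-- the `for w in getNeighborsB(m, v)` loop body: push unseen neighbors, early True on final_v
def pushAllB (fv : Int) : List Int → List Int → PySem.Set Int → Bool × List Int × PySem.Set Int
  | [], st, seen => (false, st, seen)
  | w :: ws, st, seen =>
    if w ∈ seen then pushAllB fv ws st seen
    else if w = fv then (true, st, seen)
    else pushAllB fv ws (st ++ [w]) (PySem.Set.add seen w)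

-- the `while stack:` loop
def loopB (m : List (List Int)) (fv : Int) : Nat → List Int → PySem.Set Int → Bool
  | 0, _, _ => false
  | f+1, stack, seen =>
    match stack.getLast? with
    | none => false
    | some v =>
      let r := pushAllB fv (getNeighborsB m v) stack.dropLast seen
      if r.1 then true else loopB m fv f r.2.1 r.2.2

def DFS_alt (m : List (List Int)) (vactual : Int) (final_v : Int) (visited : List Int) : Bool :=
  let vis1 := visited ++ [vactual]
  if vactual = final_v then true
  else loopB m final_v (pvMaxRow m + 2) [vactual] (PySem.Set.ofList vis1)

-- ===== PRECONDITION & SPEC =====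
def Spec_DFS (m : List (List Int)) (vactual : Int) (final_v : Int) (visited : List Int) (out : Bool) : Prop := out = DFS_alt m vactual final_v visited
instance (m : List (List Int)) (vactual : Int) (final_v : Int) (visited : List Int) (out : Bool) : Decidable (Spec_DFS m vactual final_v visited out) := by unfold Spec_DFS; infer_instance

-- ===== CLAIM (what is proved, stated in full; the proofs are below) =====
def Claim_equal_DFS : Prop := ∀ (m : List (List Int)) (vactual : Int) (final_v : Int) (visited : List Int), Dom_DFS m vactual final_v visited → Spec_DFS m vactual final_v visited (DFS m vactual final_v visited)

-- ===== LEMMAS AND PROOFS =====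

-- walks in the graph: pvWalk m a t p means p lists the vertices after a of a walk a ⇝ t
def pvWalk (m : List (List Int)) : Int → Int → List Int → Prop
  | v, t, [] => v = t
  | v, t, w :: p => w ∈ getNeighborsA m v ∧ pvWalk m w t p

-- what A's recursion computes: reachability of fv with a growing avoid list
inductive pvRch (m : List (List Int)) (fv : Int) : List Int → Int → Prop
  | hit (vis : List Int) (v : Int) : v = fv → pvRch m fv vis v
  | step (vis : List Int) (v w : Int) : w ∈ getNeighborsA m v → w ∉ vis → w ≠ v →
      pvRch m fv (v :: vis) w → pvRch m fv vis v

-- number of still-unvisited potential vertices; the fuel measure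
def pvMu (m : List (List Int)) (l : List Int) : Nat :=
  ((Finset.range (pvMaxRow m)).filter (fun (j : Nat) => (j : Int) ∉ l)).card

-- ---- neighbors ----

theorem gnA_inner (row : List Int) : ∀ (k : Int) (acc : List Int),
    (row.foldl (fun (p : List Int × Int) edges =>
      (if edges = 1 then p.1 ++ [p.2] else p.1, p.2 + 1)) (acc, k)).1
    = acc ++ ((PySem.List.enumerate row k).filter (fun p => p.2 = 1)).map (fun p => p.1) := by
  induction row with
  | nil => intro k acc; simp [PySem.List.enumerate_nil]
  | cons e row ih =>
    intro k acc
    simp only [List.foldl_cons, PySem.List.enumerate_cons, List.filter_cons]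
    by_cases he : e = 1
    · simp [he, ih (k + 1) (acc ++ [k])]
    · simp [he, ih (k + 1) acc]

theorem foldl_range_if {α : Type} (v : Int) (g : Nat → α → α) : ∀ (n : Nat) (acc : α),
    (List.range n).foldl (fun acc (i : Nat) => if (i : Int) = v then g i acc else acc) acc
    = if 0 ≤ v ∧ v < (n : Int) then g v.toNat acc else acc := by
  intro n
  induction n with
  | zero =>
    intro acc
    have : ¬ (0 ≤ v ∧ v < ((0 : Nat) : Int)) := by push_cast; omega
    simp [this]
  | succ n ih =>
    intro acc
    rw [List.range_succ, List.foldl_append, ih]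
    simp only [List.foldl_cons, List.foldl_nil]
    by_cases h2 : 0 ≤ v ∧ v < (n : Int)
    · have h : ¬ ((n : Int) = v) := by omega
      have hp : 0 ≤ v ∧ v < ((n + 1 : Nat) : Int) := by push_cast; omega
      rw [if_pos h2, if_neg h, if_pos hp]
    · by_cases h : (n : Int) = v
      · have ht : v.toNat = n := by omega
        have hp : 0 ≤ v ∧ v < ((n + 1 : Nat) : Int) := by push_cast; omega
        rw [if_neg h2, if_pos h, if_pos hp, ht]
      · have hp : ¬ (0 ≤ v ∧ v < ((n + 1 : Nat) : Int)) := by push_cast; omega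
        rw [if_neg h2, if_neg h, if_neg hp]

theorem gnA_eq (m : List (List Int)) (v : Int) : getNeighborsA m v =
    if 0 ≤ v ∧ v < (m.length : Int) then
      ((PySem.List.enumerate (m.getD v.toNat []) 0).filter (fun p => p.2 = 1)).map (fun p => p.1)
    else [] := by
  rw [getNeighborsA,
    foldl_range_if v (fun i acc => ((m.getD i []).foldl
      (fun (p : List Int × Int) edges => (if edges = 1 then p.1 ++ [p.2] else p.1, p.2 + 1))
      (acc, 0)).1) m.length []]
  by_cases h : 0 ≤ v ∧ v < (m.length : Int)
  · simp only [h, if_pos, gnA_inner, List.nil_append]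
  · simp [h]

theorem gnB_eq_gnA (m : List (List Int)) (v : Int) : getNeighborsB m v = getNeighborsA m v := by
  rw [getNeighborsB, gnA_eq]

theorem foldl_max_ge (l : List (List Int)) : ∀ (a : Nat),
    a ≤ l.foldl (fun a r => max a r.length) a ∧
    ∀ r ∈ l, r.length ≤ l.foldl (fun a r => max a r.length) a := by
  induction l with
  | nil => intro a; simp
  | cons r l ih =>
    intro a
    simp only [List.foldl_cons]
    obtain ⟨h1, h2⟩ := ih (max a r.length)
    refine ⟨le_trans (le_max_left _ _) h1, ?_⟩
    intro r' hr'
    rcases List.mem_cons.mp hr' with h | h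
    · subst h; exact le_trans (le_max_right a r'.length) h1
    · exact h2 r' h

theorem row_le_maxRow (m : List (List Int)) (r : List Int) (h : r ∈ m) : r.length ≤ pvMaxRow m :=
  (foldl_max_ge m 0).2 r h

theorem gn_bounds (m : List (List Int)) (v w : Int) (h : w ∈ getNeighborsA m v) :
    0 ≤ w ∧ w < (pvMaxRow m : Int) := by
  rw [gnA_eq] at h
  by_cases hv : 0 ≤ v ∧ v < (m.length : Int)
  · rw [if_pos hv] at h
    obtain ⟨p, hp, hw⟩ := List.mem_map.mp h
    have hpe := List.mem_filter.mp hp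
    obtain ⟨k, hk, hpk⟩ := (PySem.List.mem_enumerate_iff _ _ _).mp hpe.1
    have hrow : m.getD v.toNat [] ∈ m := by
      have hlt : v.toNat < m.length := by omega
      rw [List.getD_eq_getElem m [] hlt]
      exact List.getElem_mem hlt
    have hle := row_le_maxRow m _ hrow
    subst hpk
    simp only at hw
    omega
  · rw [if_neg hv] at h
    simp at h

-- ---- mu ----

theorem mu_le (m : List (List Int)) (l : List Int) : pvMu m l ≤ pvMaxRow m := by
  calc pvMu m l ≤ (Finset.range (pvMaxRow m)).card := Finset.card_filter_le _ _
    _ = pvMaxRow m := Finset.card_range _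

theorem mu_congr (m : List (List Int)) (l₁ l₂ : List Int) (h : ∀ x, x ∈ l₁ ↔ x ∈ l₂) :
    pvMu m l₁ = pvMu m l₂ := by
  unfold pvMu
  congr 1
  apply Finset.filter_congr
  intro j _
  simp [h]

theorem mu_cons (m : List (List Int)) (l : List Int) (w : Int)
    (h0 : 0 ≤ w) (h1 : w < (pvMaxRow m : Int)) (h2 : w ∉ l) :
    pvMu m (w :: l) + 1 = pvMu m l := by
  classical
  have hw : w.toNat ∈ (Finset.range (pvMaxRow m)).filter (fun (j : Nat) => (j : Int) ∉ l) := by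
    rw [Finset.mem_filter, Finset.mem_range]
    constructor
    · omega
    · have : ((w.toNat : Nat) : Int) = w := by omega
      rw [this]; exact h2
  have he : (Finset.range (pvMaxRow m)).filter (fun (j : Nat) => (j : Int) ∉ (w :: l)) =
      ((Finset.range (pvMaxRow m)).filter (fun (j : Nat) => (j : Int) ∉ l)).erase w.toNat := by
    ext j
    simp only [Finset.mem_filter, Finset.mem_erase, Finset.mem_range, List.mem_cons]
    constructor
    · rintro ⟨hj, hmem⟩
      push_neg at hmem
      exact ⟨by omega, hj, hmem.2⟩
    · rintro ⟨hne, hj, hmem⟩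
      refine ⟨hj, ?_⟩
      push_neg
      exact ⟨by omega, hmem⟩
  rw [pvMu, he, Finset.card_erase_of_mem hw]
  have := Finset.card_pos.mpr ⟨w.toNat, hw⟩
  unfold pvMu
  omega

-- ---- A: permutation restore, congruence, soundness, completeness ----

theorem A_perm (m : List (List Int)) (fv : Int) : ∀ f : Nat,
    (∀ v vis, (dfsA m fv f v vis).1 = false → ((dfsA m fv f v vis).2).Perm vis) ∧
    (∀ ns vis, (dfsAList m fv f ns vis).1 = false → ((dfsAList m fv f ns vis).2).Perm vis) := by
  have mkList : ∀ g : Nat,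
      (∀ v vis, (dfsA m fv g v vis).1 = false → ((dfsA m fv g v vis).2).Perm vis) →
      (∀ ns vis, (dfsAList m fv g ns vis).1 = false → ((dfsAList m fv g ns vis).2).Perm vis) := by
    intro g hA ns
    induction ns with
    | nil => intro vis _; simp [dfsAList]
    | cons n ns ih =>
      intro vis hf
      simp only [dfsAList] at hf ⊢
      by_cases hn : n ∈ vis
      · rw [if_pos hn] at hf ⊢; exact ih vis hf
      · rw [if_neg hn] at hf ⊢
        by_cases hr : (dfsA m fv g n vis).1 = true
        · rw [if_pos hr] at hf; rw [hf] at hr; simp at hr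
        · rw [if_neg hr] at hf ⊢
          exact (ih _ hf).trans (hA n vis (by simpa using hr))
  intro f
  induction f with
  | zero =>
    have hA : ∀ v vis, (dfsA m fv 0 v vis).1 = false → ((dfsA m fv 0 v vis).2).Perm vis := by
      intro v vis _; simp [dfsA]
    exact ⟨hA, mkList 0 hA⟩
  | succ f ih =>
    have hA : ∀ v vis, (dfsA m fv (f+1) v vis).1 = false →
        ((dfsA m fv (f+1) v vis).2).Perm vis := by
      intro v vis hf
      simp only [dfsA] at hf ⊢
      by_cases hv : v = fv
      · rw [if_pos hv] at hf; simp at hf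
      · rw [if_neg hv] at hf ⊢
        by_cases hr : (dfsAList m fv f (getNeighborsA m v) (vis ++ [v])).1 = true
        · rw [if_pos hr] at hf; rw [hf] at hr; simp at hr
        · rw [if_neg hr] at hf ⊢
          have h1 := ih.2 (getNeighborsA m v) (vis ++ [v]) (by simpa using hr)
          have h2 : ((dfsAList m fv f (getNeighborsA m v) (vis ++ [v])).2.erase v).Perm
              ((vis ++ [v]).erase v) := h1.erase v
          refine h2.trans ?_
          have h3 : ((vis ++ [v]).erase v).Perm ((v :: vis).erase v) :=
            (List.perm_append_singleton v vis).erase v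
          rw [List.erase_cons_head] at h3
          exact h3
    exact ⟨hA, mkList (f+1) hA⟩

theorem A_congr (m : List (List Int)) (fv : Int) : ∀ f : Nat,
    (∀ v vis₁ vis₂, vis₁.Perm vis₂ →
      (dfsA m fv f v vis₁).1 = (dfsA m fv f v vis₂).1 ∧
      ((dfsA m fv f v vis₁).2).Perm ((dfsA m fv f v vis₂).2)) ∧
    (∀ ns vis₁ vis₂, vis₁.Perm vis₂ →
      (dfsAList m fv f ns vis₁).1 = (dfsAList m fv f ns vis₂).1 ∧
      ((dfsAList m fv f ns vis₁).2).Perm ((dfsAList m fv f ns vis₂).2)) := by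
  have mkList : ∀ g : Nat,
      (∀ v vis₁ vis₂, vis₁.Perm vis₂ →
        (dfsA m fv g v vis₁).1 = (dfsA m fv g v vis₂).1 ∧
        ((dfsA m fv g v vis₁).2).Perm ((dfsA m fv g v vis₂).2)) →
      (∀ ns vis₁ vis₂, vis₁.Perm vis₂ →
        (dfsAList m fv g ns vis₁).1 = (dfsAList m fv g ns vis₂).1 ∧
        ((dfsAList m fv g ns vis₁).2).Perm ((dfsAList m fv g ns vis₂).2)) := by
    intro g hA ns
    induction ns with
    | nil => intro vis₁ vis₂ hp; simpa [dfsAList] using hp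
    | cons n ns ih =>
      intro vis₁ vis₂ hp
      simp only [dfsAList]
      by_cases hn : n ∈ vis₁
      · rw [if_pos hn, if_pos (hp.mem_iff.mp hn)]; exact ih vis₁ vis₂ hp
      · rw [if_neg hn, if_neg (fun c => hn (hp.mem_iff.mpr c))]
        obtain ⟨he, hpr⟩ := hA n vis₁ vis₂ hp
        by_cases hr : (dfsA m fv g n vis₁).1 = true
        · rw [if_pos hr, if_pos (he.symm.trans hr)]; exact ⟨he, hpr⟩
        · rw [if_neg hr, if_neg (fun c => hr (he.trans c))]
          exact ih _ _ hpr
  intro f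
  induction f with
  | zero =>
    have hA : ∀ v vis₁ vis₂, vis₁.Perm vis₂ →
        (dfsA m fv 0 v vis₁).1 = (dfsA m fv 0 v vis₂).1 ∧
        ((dfsA m fv 0 v vis₁).2).Perm ((dfsA m fv 0 v vis₂).2) := by
      intro v vis₁ vis₂ hp; simpa [dfsA] using hp
    exact ⟨hA, mkList 0 hA⟩
  | succ f ih =>
    have hA : ∀ v vis₁ vis₂, vis₁.Perm vis₂ →
        (dfsA m fv (f+1) v vis₁).1 = (dfsA m fv (f+1) v vis₂).1 ∧
        ((dfsA m fv (f+1) v vis₁).2).Perm ((dfsA m fv (f+1) v vis₂).2) := by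
      intro v vis₁ vis₂ hp
      simp only [dfsA]
      have hp1 : (vis₁ ++ [v]).Perm (vis₂ ++ [v]) := hp.append_right [v]
      by_cases hv : v = fv
      · rw [if_pos hv, if_pos hv]; exact ⟨rfl, hp1⟩
      · rw [if_neg hv, if_neg hv]
        obtain ⟨he, hpr⟩ := ih.2 (getNeighborsA m v) (vis₁ ++ [v]) (vis₂ ++ [v]) hp1
        by_cases hr : (dfsAList m fv f (getNeighborsA m v) (vis₁ ++ [v])).1 = true
        · rw [if_pos hr, if_pos (he.symm.trans hr)]; exact ⟨he, hpr⟩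
        · rw [if_neg hr, if_neg (fun c => hr (he.trans c))]
          exact ⟨rfl, hpr.erase v⟩
    exact ⟨hA, mkList (f+1) hA⟩

theorem rch_congr (m : List (List Int)) (fv : Int) (l₁ l₂ : List Int) (v : Int)
    (h : ∀ x, x ∈ l₁ ↔ x ∈ l₂) (hr : pvRch m fv l₁ v) : pvRch m fv l₂ v := by
  induction hr generalizing l₂ with
  | hit vis v hv => exact pvRch.hit _ _ hv
  | step vis v w hw hnv hne _ ih =>
    refine pvRch.step _ _ _ hw (fun c => hnv ((h w).mpr c)) hne (ih _ ?_)
    intro x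
    simp only [List.mem_cons, h x]

theorem A_sound (m : List (List Int)) (fv : Int) : ∀ f : Nat,
    (∀ v vis, (dfsA m fv f v vis).1 = true → pvRch m fv vis v) ∧
    (∀ ns vis vis₀, vis.Perm vis₀ → (dfsAList m fv f ns vis).1 = true →
      ∃ w ∈ ns, w ∉ vis₀ ∧ pvRch m fv vis₀ w) := by
  have mkList : ∀ g : Nat,
      (∀ v vis, (dfsA m fv g v vis).1 = true → pvRch m fv vis v) →
      (∀ ns vis vis₀, vis.Perm vis₀ → (dfsAList m fv g ns vis).1 = true →
        ∃ w ∈ ns, w ∉ vis₀ ∧ pvRch m fv vis₀ w) := by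
    intro g hA ns
    induction ns with
    | nil => intro vis vis₀ _ hf; simp [dfsAList] at hf
    | cons n ns ih =>
      intro vis vis₀ hp hf
      simp only [dfsAList] at hf
      by_cases hn : n ∈ vis
      · rw [if_pos hn] at hf
        obtain ⟨w, h1, h2, h3⟩ := ih vis vis₀ hp hf
        exact ⟨w, List.mem_cons_of_mem _ h1, h2, h3⟩
      · rw [if_neg hn] at hf
        by_cases hr : (dfsA m fv g n vis).1 = true
        · refine ⟨n, List.mem_cons_self .., fun c => hn (hp.mem_iff.mpr c), ?_⟩
          exact rch_congr m fv vis vis₀ n (fun x => hp.mem_iff) (hA n vis hr)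
        · rw [if_neg hr] at hf
          have hperm : ((dfsA m fv g n vis).2).Perm vis₀ :=
            ((A_perm m fv g).1 n vis (by simpa using hr)).trans hp
          obtain ⟨w, h1, h2, h3⟩ := ih _ vis₀ hperm hf
          exact ⟨w, List.mem_cons_of_mem _ h1, h2, h3⟩
  intro f
  induction f with
  | zero =>
    have hA : ∀ v vis, (dfsA m fv 0 v vis).1 = true → pvRch m fv vis v := by
      intro v vis hf; simp [dfsA] at hf
    exact ⟨hA, mkList 0 hA⟩
  | succ f ih =>
    have hA : ∀ v vis, (dfsA m fv (f+1) v vis).1 = true → pvRch m fv vis v := by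
      intro v vis hf
      simp only [dfsA] at hf
      by_cases hv : v = fv
      · exact pvRch.hit _ _ hv
      · rw [if_neg hv] at hf
        by_cases hr : (dfsAList m fv f (getNeighborsA m v) (vis ++ [v])).1 = true
        · obtain ⟨w, h1, h2, h3⟩ := ih.2 (getNeighborsA m v) (vis ++ [v]) (vis ++ [v])
            (List.Perm.refl _) hr
          have h2' : w ∉ vis ∧ w ≠ v := by
            constructor
            · exact fun c => h2 (List.mem_append.mpr (Or.inl c))
            · exact fun c => h2 (List.mem_append.mpr (Or.inr (by simp [c])))
          refine pvRch.step _ _ _ h1 h2'.1 h2'.2 ?_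
          refine rch_congr m fv (vis ++ [v]) (v :: vis) w (fun x => ?_) h3
          simp [List.mem_append, List.mem_cons, or_comm]
        · rw [if_neg hr] at hf; simp at hf
    exact ⟨hA, mkList (f+1) hA⟩

theorem A_complete (m : List (List Int)) (fv : Int) (vis : List Int) (v : Int)
    (h : pvRch m fv vis v) : ∀ f : Nat, pvMu m (v :: vis) + 1 ≤ f →
    (dfsA m fv f v vis).1 = true := by
  induction h with
  | hit vis v hv =>
    intro f hf
    obtain ⟨g, rfl⟩ : ∃ g, f = g + 1 := ⟨f - 1, by omega⟩
    simp [dfsA, hv]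
  | step vis v w hw hnv hne hr ih =>
    intro f hf
    obtain ⟨g, rfl⟩ : ∃ g, f = g + 1 := ⟨f - 1, by omega⟩
    by_cases hvf : v = fv
    · simp [dfsA, hvf]
    · have hbounds := gn_bounds m v w hw
      have hwvv : w ∉ v :: vis := by simp [hne, hnv]
      have hmu : pvMu m (w :: v :: vis) + 1 = pvMu m (v :: vis) :=
        mu_cons m (v :: vis) w hbounds.1 hbounds.2 hwvv
      have hg : pvMu m (w :: v :: vis) + 1 ≤ g := by omega
      have hlist : ∀ ns, w ∈ ns → ∀ visC, visC.Perm (v :: vis) →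
          (dfsAList m fv g ns visC).1 = true := by
        intro ns
        induction ns with
        | nil => intro hmem; simp at hmem
        | cons n ns ihn =>
          intro hmem visC hperm
          simp only [dfsAList]
          have hwnotC : w ∉ visC := fun c => hwvv (hperm.mem_iff.mp c)
          by_cases hn : n ∈ visC
          · rw [if_pos hn]
            have hnw : n ≠ w := fun c => hwnotC (c ▸ hn)
            exact ihn ((List.mem_cons.mp hmem).resolve_left (fun c => hnw c.symm)) visC hperm
          · rw [if_neg hn]
            by_cases hnw : n = w
            · subst hnw
              have h1 : (dfsA m fv g n (v :: vis)).1 = true := ih g hg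
              have h2 := ((A_congr m fv g).1 n visC (v :: vis) hperm).1
              rw [if_pos (h2.trans h1)]
              exact h2.trans h1
            · by_cases hr1 : (dfsA m fv g n visC).1 = true
              · rw [if_pos hr1]; exact hr1
              · rw [if_neg hr1]
                have hperm2 : ((dfsA m fv g n visC).2).Perm (v :: vis) :=
                  ((A_perm m fv g).1 n visC (by simpa using hr1)).trans hperm
                exact ihn ((List.mem_cons.mp hmem).resolve_left (fun c => hnw c.symm)) _ hperm2
      have hres := hlist (getNeighborsA m v) hw (vis ++ [v]) (List.perm_append_singleton v vis)
      simp [dfsA, hvf, hres]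

-- ---- walks vs pvRch ----

theorem walk_append (m : List (List Int)) : ∀ (p : List Int) (a b c : Int),
    pvWalk m a b p → c ∈ getNeighborsA m b → pvWalk m a c (p ++ [c]) := by
  intro p
  induction p with
  | nil =>
    intro a b c h hc
    subst h
    exact ⟨hc, rfl⟩
  | cons w p ih =>
    intro a b c h hc
    exact ⟨h.1, ih w b c h.2 hc⟩

theorem walk_cut (m : List (List Int)) : ∀ (a : List Int) (u t x : Int) (b : List Int),
    pvWalk m u t (a ++ x :: b) → pvWalk m x t b := by
  intro a
  induction a with
  | nil => intro u t x b h; exact h.2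
  | cons y a ih => intro u t x b h; exact ih y t x b h.2

theorem walk_last_mem (m : List (List Int)) : ∀ (p : List Int) (a t : Int),
    pvWalk m a t p → p ≠ [] → t ∈ p := by
  intro p
  induction p with
  | nil => intro a t _ h; exact absurd rfl h
  | cons w p ih =>
    intro a t h _
    rcases List.eq_nil_or_concat' p with rfl | _
    · rw [show t = w from h.2.symm]; exact List.mem_cons_self ..
    · have : p ≠ [] := by rintro rfl; simp_all
      exact List.mem_cons_of_mem _ (ih w t h.2 this)

theorem rch_to_walk (m : List (List Int)) (fv : Int) (X : List Int) (v : Int)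
    (h : pvRch m fv X v) :
    ∃ p, pvWalk m v fv p ∧ p.Nodup ∧ ∀ x ∈ p, x ∉ X ∧ x ≠ v := by
  induction h with
  | hit vis v hv => exact ⟨[], hv, List.nodup_nil, by simp⟩
  | step vis v w hw hnv hne _ ih =>
    obtain ⟨p, hp, hnd, hc⟩ := ih
    refine ⟨w :: p, ⟨hw, hp⟩, ?_, ?_⟩
    · exact List.nodup_cons.mpr ⟨fun c => (hc w c).2 rfl, hnd⟩
    · intro x hx
      rcases List.mem_cons.mp hx with rfl | hx
      · exact ⟨hnv, hne⟩
      · have := hc x hx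
        refine ⟨fun c => this.1 (List.mem_cons_of_mem _ c), fun c => this.1 (c ▸ List.mem_cons_self ..)⟩

theorem walk_to_rch (m : List (List Int)) (fv : Int) : ∀ (p : List Int) (v : Int) (X : List Int),
    pvWalk m v fv p → p.Nodup → (∀ x ∈ p, x ∉ X ∧ x ≠ v) → pvRch m fv X v := by
  intro p
  induction p with
  | nil => intro v X h _ _; exact pvRch.hit _ _ h
  | cons w p ih =>
    intro v X h hnd hc
    have hcw := hc w (List.mem_cons_self ..)
    refine pvRch.step _ _ _ h.1 hcw.1 hcw.2 ?_
    refine ih w (v :: X) h.2 (List.nodup_cons.mp hnd).2 ?_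
    intro x hx
    have h1 := hc x (List.mem_cons_of_mem _ hx)
    have h2 : x ≠ w := fun c => (List.nodup_cons.mp hnd).1 (c ▸ hx)
    refine ⟨fun c => ?_, h2⟩
    rcases List.mem_cons.mp c with rfl | c
    · exact h1.2 rfl
    · exact h1.1 c

-- ---- pushAllB ----

theorem pb_false (fv : Int) : ∀ (ws st : List Int) (seen : PySem.Set Int),
    (pushAllB fv ws st seen).1 = false →
    ((∀ x ∈ st, x ∈ (pushAllB fv ws st seen).2.1) ∧
     (∀ x ∈ seen, x ∈ (pushAllB fv ws st seen).2.2) ∧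
     (∀ x ∈ (pushAllB fv ws st seen).2.1, x ∈ st ∨ (x ∈ ws ∧ x ∉ seen ∧ x ∈ (pushAllB fv ws st seen).2.2)) ∧
     (∀ x ∈ ws, x ∈ (pushAllB fv ws st seen).2.2) ∧
     (fv ∉ seen → fv ∉ (pushAllB fv ws st seen).2.2) ∧
     (∀ x, x ∉ seen → x ∈ (pushAllB fv ws st seen).2.2 → x ∈ (pushAllB fv ws st seen).2.1)) := by
  intro ws
  induction ws with
  | nil =>
    intro st seen _
    simp only [pushAllB]
    exact ⟨fun x h => h, fun x h => h, fun x h => Or.inl h, by simp, fun h => h, fun x h1 h2 => absurd h2 h1⟩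
  | cons w ws ih =>
    intro st seen hf
    simp only [pushAllB] at hf ⊢
    by_cases hw : w ∈ seen
    · rw [if_pos hw] at hf ⊢
      obtain ⟨c1, c2, c3, c4, c5, c6⟩ := ih st seen hf
      refine ⟨c1, c2, fun x hx => ?_, fun x hx => ?_, c5, c6⟩
      · cases c3 x hx with
        | inl h => exact Or.inl h
        | inr h => exact Or.inr ⟨List.mem_cons_of_mem _ h.1, h.2.1, h.2.2⟩
      · rcases List.mem_cons.mp hx with h | h
        · subst h; exact c2 x hw
        · exact c4 x h
    · rw [if_neg hw] at hf ⊢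
      by_cases hwf : w = fv
      · rw [if_pos hwf] at hf; simp at hf
      · rw [if_neg hwf] at hf ⊢
        obtain ⟨c1, c2, c3, c4, c5, c6⟩ := ih (st ++ [w]) (PySem.Set.add seen w) hf
        have hadd : ∀ x, x ∈ PySem.Set.add seen w ↔ x ∈ seen ∨ x = w :=
          fun x => PySem.Set.mem_add seen w x
        refine ⟨?_, ?_, ?_, ?_, ?_, ?_⟩
        · exact fun x hx => c1 x (List.mem_append.mpr (Or.inl hx))
        · exact fun x hx => c2 x ((hadd x).mpr (Or.inl hx))
        · intro x hx
          cases c3 x hx with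
          | inl h =>
            rcases List.mem_append.mp h with h | h
            · exact Or.inl h
            · have hxw : x = w := by simpa using h
              subst hxw
              exact Or.inr ⟨List.mem_cons_self .., hw, c2 x ((hadd x).mpr (Or.inr rfl))⟩
          | inr h =>
            exact Or.inr ⟨List.mem_cons_of_mem _ h.1,
              fun c => h.2.1 ((hadd x).mpr (Or.inl c)), h.2.2⟩
        · intro x hx
          rcases List.mem_cons.mp hx with h | h
          · subst h; exact c2 x ((hadd x).mpr (Or.inr rfl))
          · exact c4 x h
        · intro hfv
          exact c5 (fun c => (by rcases (hadd fv).mp c with h | h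
                                 · exact hfv h
                                 · exact hwf h.symm))
        · intro x hx1 hx2
          by_cases hxw : x = w
          · subst hxw
            exact c1 x (List.mem_append.mpr (Or.inr (List.mem_singleton.mpr rfl)))
          · exact c6 x (fun c => (by rcases (hadd x).mp c with h | h
                                     · exact hx1 h
                                     · exact hxw h)) hx2

theorem pb_len (m : List (List Int)) (fv : Int) : ∀ (ws st : List Int) (seen : PySem.Set Int),
    (∀ w ∈ ws, 0 ≤ w ∧ w < (pvMaxRow m : Int)) → (pushAllB fv ws st seen).1 = false →
    (pushAllB fv ws st seen).2.1.length + pvMu m (pushAllB fv ws st seen).2.2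
      = st.length + pvMu m seen := by
  intro ws
  induction ws with
  | nil => intro st seen _ _; simp [pushAllB]
  | cons w ws ih =>
    intro st seen hb hf
    simp only [pushAllB] at hf ⊢
    by_cases hw : w ∈ seen
    · rw [if_pos hw] at hf ⊢
      exact ih st seen (fun x hx => hb x (List.mem_cons_of_mem _ hx)) hf
    · rw [if_neg hw] at hf ⊢
      by_cases hwf : w = fv
      · rw [if_pos hwf] at hf; simp at hf
      · rw [if_neg hwf] at hf ⊢
        have h1 := ih (st ++ [w]) (PySem.Set.add seen w)
          (fun x hx => hb x (List.mem_cons_of_mem _ hx)) hf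
        have hmu1 : pvMu m (PySem.Set.add seen w) = pvMu m (w :: seen) :=
          mu_congr m _ _ (fun x => by
            rw [PySem.Set.mem_add seen w x, List.mem_cons, or_comm])
        have hwb := hb w (List.mem_cons_self ..)
        have hmu2 : pvMu m (w :: seen) + 1 = pvMu m seen :=
          mu_cons m seen w hwb.1 hwb.2 hw
        rw [h1, List.length_append]
        simp only [List.length_singleton]
        omega

theorem pb_true (fv : Int) : ∀ (ws st : List Int) (seen : PySem.Set Int),
    (pushAllB fv ws st seen).1 = true → fv ∈ ws ∧ fv ∉ seen := by
  intro ws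
  induction ws with
  | nil => intro st seen h; simp [pushAllB] at h
  | cons w ws ih =>
    intro st seen h
    simp only [pushAllB] at h
    by_cases hw : w ∈ seen
    · rw [if_pos hw] at h
      obtain ⟨h1, h2⟩ := ih st seen h
      exact ⟨List.mem_cons_of_mem _ h1, h2⟩
    · rw [if_neg hw] at h
      by_cases hwf : w = fv
      · subst hwf
        exact ⟨List.mem_cons_self .., hw⟩
      · rw [if_neg hwf] at h
        obtain ⟨h1, h2⟩ := ih _ _ h
        refine ⟨List.mem_cons_of_mem _ h1, fun c => h2 ?_⟩
        rw [PySem.Set.mem_add seen w fv]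
        exact Or.inl c

-- ---- B soundness and completeness ----

theorem B_sound (m : List (List Int)) (fv root : Int) (A0 : List Int) : ∀ (f : Nat)
    (st : List Int) (seen : PySem.Set Int),
    (∀ x ∈ A0, x ∈ seen) → root ∈ seen →
    (∀ u ∈ st, ∃ p, pvWalk m root u p ∧ (∀ x ∈ p, x ∉ A0 ∧ x ∈ seen) ∧ (root :: p).Nodup) →
    loopB m fv f st seen = true →
    ∃ p, pvWalk m root fv p ∧ (∀ x ∈ p, x ∉ A0 ∧ x ≠ root) ∧ p.Nodup := by
  intro f
  induction f with
  | zero => intro st seen _ _ _ hl; simp [loopB] at hl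
  | succ f ih =>
    intro st seen hA0 hroot hJ hl
    cases hlast : st.getLast? with
    | none => simp only [loopB, hlast] at hl; exact absurd hl (by simp)
    | some v =>
      simp only [loopB, hlast] at hl
      have hvst : v ∈ st := List.mem_of_getLast? hlast
      obtain ⟨pv, hpvw, hpvc, hpvn⟩ := hJ v hvst
      by_cases hr : (pushAllB fv (getNeighborsB m v) st.dropLast seen).1 = true
      · obtain ⟨hfw, hfs⟩ := pb_true fv _ _ _ hr
        rw [gnB_eq_gnA] at hfw
        refine ⟨pv ++ [fv], walk_append m pv root v fv hpvw hfw, ?_, ?_⟩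
        · intro x hx
          rcases List.mem_append.mp hx with hx | hx
          · refine ⟨(hpvc x hx).1, fun c => (List.nodup_cons.mp hpvn).1 ?_⟩
            rw [← c]; exact hx
          · have hxfv : x = fv := by simpa using hx
            constructor
            · intro c; apply hfs; apply hA0; rw [← hxfv]; exact c
            · intro c; apply hfs; rw [← hxfv, c]; exact hroot
        · rw [List.nodup_append]
          refine ⟨(List.nodup_cons.mp hpvn).2, by simp, ?_⟩
          intro x hx y hy
          have hy' : y = fv := by simpa using hy
          intro c
          apply hfs
          rw [← hy', ← c]
          exact (hpvc x hx).2
      · rw [if_neg hr] at hl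
        obtain ⟨c1, c2, c3, c4, c5, c6⟩ := pb_false fv (getNeighborsB m v) st.dropLast seen
          (by simpa using hr)
        refine ih _ _ (fun x hx => c2 x (hA0 x hx)) (c2 root hroot) ?_ hl
        intro u hu
        cases c3 u hu with
        | inl h =>
          obtain ⟨q, hq1, hq2, hq3⟩ := hJ u ((List.dropLast_sublist st).subset h)
          exact ⟨q, hq1, fun x hx => ⟨(hq2 x hx).1, c2 x (hq2 x hx).2⟩, hq3⟩
        | inr h =>
          obtain ⟨hws, hns, hs'⟩ := h
          rw [gnB_eq_gnA] at hws
          refine ⟨pv ++ [u], walk_append m pv root v u hpvw hws, ?_, ?_⟩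
          · intro x hx
            rcases List.mem_append.mp hx with hx | hx
            · exact ⟨(hpvc x hx).1, c2 x (hpvc x hx).2⟩
            · have hxu : x = u := by simpa using hx
              subst hxu
              exact ⟨fun c => hns (hA0 x c), hs'⟩
          · rw [show root :: (pv ++ [u]) = (root :: pv) ++ [u] by simp, List.nodup_append]
            refine ⟨hpvn, by simp, ?_⟩
            intro x hx y hy
            have hy' : y = u := by simpa using hy
            intro c
            apply hns
            rw [← hy', ← c]
            rcases List.mem_cons.mp hx with h | h
            · rw [h]; exact hroot
            · exact (hpvc x h).2

theorem B_complete (m : List (List Int)) (fv : Int) : ∀ (f : Nat) (st : List Int)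
    (seen : PySem.Set Int) (u : Int) (p : List Int),
    u ∈ st → pvWalk m u fv p → (u :: p).Nodup →
    (∀ x ∈ p, x ∉ seen ∨ x ∈ st) → (∀ x ∈ st, x ∈ seen) → fv ∉ seen →
    st.length + pvMu m seen + 1 ≤ f →
    loopB m fv f st seen = true := by
  intro f
  induction f with
  | zero =>
    intro st seen u p hu _ _ _ _ _ hfuel
    have : st ≠ [] := List.ne_nil_of_mem hu
    have : 1 ≤ st.length := List.length_pos_of_ne_nil this
    omega
  | succ f ih =>
    intro st seen u p hu hwp hnd hcond hsub hfv hfuel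
    have hne : st ≠ [] := List.ne_nil_of_mem hu
    have hlast : st.getLast? = some (st.getLast hne) := List.getLast?_eq_some_getLast hne
    set vv := st.getLast hne with hvv
    have hvmem : vv ∈ st := List.getLast_mem hne
    have hst : st.dropLast ++ [vv] = st := List.dropLast_append_getLast hne
    have hlen : st.dropLast.length + 1 = st.length := by
      rw [List.length_dropLast]
      have : 1 ≤ st.length := List.length_pos_of_ne_nil hne
      omega
    have hvfv : vv ≠ fv := fun c => hfv (c ▸ hsub vv hvmem)
    simp only [loopB, hlast]
    by_cases hr : (pushAllB fv (getNeighborsB m vv) st.dropLast seen).1 = true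
    · rw [if_pos hr]
    · rw [if_neg hr]
      obtain ⟨c1, c2, c3, c4, c5, c6⟩ := pb_false fv (getNeighborsB m vv) st.dropLast seen
        (by simpa using hr)
      -- after one loop step, any witness avoiding vv lets us recurse
      have hfuel' : (pushAllB fv (getNeighborsB m vv) st.dropLast seen).2.1.length +
          pvMu m (pushAllB fv (getNeighborsB m vv) st.dropLast seen).2.2 + 1 ≤ f := by
        have hb : ∀ w ∈ getNeighborsB m vv, 0 ≤ w ∧ w < (pvMaxRow m : Int) := by
          intro w hw; rw [gnB_eq_gnA] at hw; exact gn_bounds m vv w hw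
        have := pb_len m fv (getNeighborsB m vv) st.dropLast seen hb (by simpa using hr)
        omega
      have hstep : ∀ (u' : Int) (p' : List Int),
          u' ∈ (pushAllB fv (getNeighborsB m vv) st.dropLast seen).2.1 →
          pvWalk m u' fv p' → (u' :: p').Nodup →
          (∀ x ∈ p', (x ∉ seen ∨ x ∈ st) ∧ x ≠ vv) →
          loopB m fv f (pushAllB fv (getNeighborsB m vv) st.dropLast seen).2.1
            (pushAllB fv (getNeighborsB m vv) st.dropLast seen).2.2 = true := by
        intro u' p' hu' hwp' hnd' hcond'
        refine ih _ _ u' p' hu' hwp' hnd' ?_ ?_ (c5 hfv) hfuel'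
        · intro x hx
          obtain ⟨hx1, hx2⟩ := hcond' x hx
          cases hx1 with
          | inl h =>
            by_cases hx3 : x ∈ (pushAllB fv (getNeighborsB m vv) st.dropLast seen).2.2
            · exact Or.inr (c6 x h hx3)
            · exact Or.inl hx3
          | inr h =>
            refine Or.inr (c1 x ?_)
            have := (List.mem_append.mp (hst ▸ h))
            rcases this with h' | h'
            · exact h'
            · exact absurd (by simpa using h') hx2
        · intro x hx
          cases c3 x hx with
          | inl h => exact c2 x (hsub x ((List.dropLast_sublist st).subset h))
          | inr h => exact h.2.2
      -- find a start for the next iteration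
      have main : ∀ (q : List Int), pvWalk m vv fv q → (vv :: q).Nodup →
          (∀ x ∈ q, x ∉ seen ∨ x ∈ st) →
          loopB m fv f (pushAllB fv (getNeighborsB m vv) st.dropLast seen).2.1
            (pushAllB fv (getNeighborsB m vv) st.dropLast seen).2.2 = true := by
        intro q hwq hndq hcq
        cases q with
        | nil => exact absurd hwq hvfv
        | cons w q' =>
          have hww : w ∈ getNeighborsB m vv := by
            rw [gnB_eq_gnA]; exact hwq.1
          have hwvv : w ≠ vv := fun c => (List.nodup_cons.mp hndq).1 (c ▸ List.mem_cons_self ..)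
          have hwst' : w ∈ (pushAllB fv (getNeighborsB m vv) st.dropLast seen).2.1 := by
            by_cases hwseen : w ∈ seen
            · have hwst : w ∈ st := (hcq w (List.mem_cons_self ..)).resolve_left (fun c => c hwseen)
              refine c1 w ?_
              rcases List.mem_append.mp (hst ▸ hwst) with h' | h'
              · exact h'
              · exact absurd (by simpa using h') hwvv
            · exact c6 w hwseen (c4 w hww)
          refine hstep w q' hwst' hwq.2 (List.nodup_cons.mp hndq).2 ?_
          intro x hx
          refine ⟨hcq x (List.mem_cons_of_mem _ hx), ?_⟩
          exact fun c => (List.nodup_cons.mp hndq).1 (c ▸ List.mem_cons_of_mem _ hx)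
      by_cases hvp : vv ∈ p
      · obtain ⟨a, b, rfl⟩ := List.append_of_mem hvp
        have hwb : pvWalk m vv fv b := walk_cut m a u fv vv b hwp
        have hsuf : (vv :: b).Sublist (a ++ vv :: b) := (List.suffix_append a (vv :: b)).sublist
        have hndb : (vv :: b).Nodup := ((List.nodup_cons.mp hnd).2).sublist hsuf
        exact main b hwb hndb (fun x hx => hcond x (List.mem_append.mpr (Or.inr (List.mem_cons_of_mem _ hx))))
      · by_cases huv : u = vv
        · subst huv
          exact main p hwp hnd (fun x hx => hcond x hx)
        · have hust : u ∈ st.dropLast := by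
            rcases List.mem_append.mp (hst ▸ hu) with h' | h'
            · exact h'
            · exact absurd (by simpa using h') huv
          refine hstep u p (c1 u hust) hwp hnd ?_
          intro x hx
          exact ⟨hcond x hx, fun c => hvp (c ▸ hx)⟩

-- ===== VERDICT (by name: the statement is the Claim_ definition above) =====
theorem DFS_equal (m : List (List Int)) (v fv : Int) (vis : List Int) :
    DFS m v fv vis = DFS_alt m v fv vis := by
  unfold DFS DFS_alt
  by_cases hvf : v = fv
  · rw [if_pos hvf]
    simp [dfsA, hvf]
  · rw [if_neg hvf]
    have dir1 : (dfsA m fv (pvMaxRow m + 2) v vis).1 = true →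
        loopB m fv (pvMaxRow m + 2) [v] (PySem.Set.ofList (vis ++ [v])) = true := by
      intro h1
      have hRch := (A_sound m fv (pvMaxRow m + 2)).1 v vis h1
      obtain ⟨p, hwp, hnd, hc⟩ := rch_to_walk m fv vis v hRch
      have hpne : p ≠ [] := by rintro rfl; exact hvf hwp
      have hfvp : fv ∈ p := walk_last_mem m p v fv hwp hpne
      have hfvS : fv ∉ PySem.Set.ofList (vis ++ [v]) := by
        rw [PySem.Set.mem_ofList _ _]
        intro c
        rcases List.mem_append.mp c with c | c
        · exact (hc fv hfvp).1 c
        · exact (hc fv hfvp).2 (by simpa using c)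
      refine B_complete m fv (pvMaxRow m + 2) [v] (PySem.Set.ofList (vis ++ [v])) v p
        (List.mem_cons_self ..) hwp ?_ ?_ ?_ hfvS ?_
      · exact List.nodup_cons.mpr ⟨fun c => (hc v c).2 rfl, hnd⟩
      · intro x hx
        refine Or.inl ?_
        rw [PySem.Set.mem_ofList _ _]
        intro c
        rcases List.mem_append.mp c with c | c
        · exact (hc x hx).1 c
        · exact (hc x hx).2 (by simpa using c)
      · intro x hx
        have hxv : x = v := by simpa using hx
        subst hxv
        rw [PySem.Set.mem_ofList _ _]
        exact List.mem_append.mpr (Or.inr (by simp))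
      · have h1 := mu_le m (PySem.Set.ofList (vis ++ [v]))
        simp only [List.length_singleton]
        omega
    have dir2 : loopB m fv (pvMaxRow m + 2) [v] (PySem.Set.ofList (vis ++ [v])) = true →
        (dfsA m fv (pvMaxRow m + 2) v vis).1 = true := by
      intro h2
      have hB := B_sound m fv v (vis ++ [v]) (pvMaxRow m + 2) [v]
        (PySem.Set.ofList (vis ++ [v]))
        (fun x hx => (PySem.Set.mem_ofList _ _).mpr hx)
        ((PySem.Set.mem_ofList _ _).mpr (List.mem_append.mpr (Or.inr (by simp))))
        (by
          intro u hu
          have huv : u = v := by simpa using hu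
          subst huv
          exact ⟨[], rfl, by simp, by simp⟩) h2
      obtain ⟨p, hwp, hcnd, hnd⟩ := hB
      have hRch : pvRch m fv vis v := by
        refine walk_to_rch m fv p v vis hwp hnd ?_
        intro x hx
        exact ⟨fun c => (hcnd x hx).1 (List.mem_append.mpr (Or.inl c)), (hcnd x hx).2⟩
      refine A_complete m fv vis v hRch (pvMaxRow m + 2) ?_
      have := mu_le m (v :: vis)
      omega
    cases hA : (dfsA m fv (pvMaxRow m + 2) v vis).1 with
    | true => exact (dir1 hA).symm
    | false =>
      cases hB : loopB m fv (pvMaxRow m + 2) [v] (PySem.Set.ofList (vis ++ [v])) with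
      | true => rw [dir2 hB] at hA; exact absurd hA (by simp)
      | false => rfl

theorem DFS_spec : Claim_equal_DFS := by
  unfold Claim_equal_DFS
  intro m vactual final_v visited _
  unfold Spec_DFS
  exact DFS_equal m vactual final_v visited
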